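-- pv_equiv track=rewrite | github.com/vikkastiwari/competitive-coding-questions | company/InfyTQ/practice/matrixProcess.py | count_freq
-- ===== SOURCE A (Python) =====
-- def count_freq(list):
--     count = {}
--     for each in list:
--         if each in count:
--             count[each] += 1
--         else:
--             count[each] = 1
--     for key, value in count.items():
--         if(value >= 4):
--             return key
-- ===== SOURCE B (Python) =====
-- def count_freq(list):
--     # Simpler: no frequency dict; return the first element whose total count >= 4.
--     for each in list:
--         if list.count(each) >= 4:
--             return each
-- ===== Notes on version B (the rewrite author's own statement) =====
-- stated objective: simpler
-- what changed: Replaced the frequency-dictionary build plus a second pass over dict items by a single in-order scan that returns the first element whose list.count is >= 4.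
import Mathlib
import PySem

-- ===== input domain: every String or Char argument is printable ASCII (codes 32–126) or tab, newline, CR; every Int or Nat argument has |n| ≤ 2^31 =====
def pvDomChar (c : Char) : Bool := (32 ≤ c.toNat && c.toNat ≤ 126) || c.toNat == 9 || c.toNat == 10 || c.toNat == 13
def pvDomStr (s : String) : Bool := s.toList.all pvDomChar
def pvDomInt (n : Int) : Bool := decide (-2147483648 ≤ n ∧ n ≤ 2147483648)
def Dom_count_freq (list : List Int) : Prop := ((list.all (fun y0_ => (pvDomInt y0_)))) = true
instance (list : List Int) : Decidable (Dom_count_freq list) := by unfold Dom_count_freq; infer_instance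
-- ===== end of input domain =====

-- B replaces A's frequency dictionary + items pass by one in-order scan using list.count (simpler, not faster).

-- ===== PORT A =====
-- second loop of A: 'for key, value in count.items(): if value >= 4: return key'
def pvFindA : List (Int × Int) → Option Int
  | [] => none
  | (k, v) :: t => if 4 ≤ v then some k else pvFindA t

def count_freq (list : List Int) : Option Int :=
  let count := list.foldl
    (fun d each =>
      if d.contains each then d.insert each (d.getD each 0 + 1)
      else d.insert each 1)
    PySem.Dict.empty
  pvFindA count.items

-- ===== PORT B =====
-- 'for each in list: if list.count(each) >= 4: return each'
def pvScanB (full : List Int) : List Int → Option Int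
  | [] => none
  | x :: t => if 4 ≤ PySem.List.count full x then some x else pvScanB full t

def count_freq_alt (list : List Int) : Option Int :=
  pvScanB list list

-- ===== PRECONDITION & SPEC =====
def Spec_count_freq (list : List Int) (out : Option Int) : Prop := out = count_freq_alt list
instance (list : List Int) (out : Option Int) : Decidable (Spec_count_freq list out) := by unfold Spec_count_freq; infer_instance

-- ===== CLAIM (what is proved, stated in full; the proofs are below) =====
def Claim_equal_count_freq : Prop := ∀ (list : List Int), Dom_count_freq list → Spec_count_freq list (count_freq list)

-- ===== LEMMAS AND PROOFS =====

-- A's counting loop is the Counter loop.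
theorem pvFoldA_eq_counter (l : List Int) :
    l.foldl
      (fun d each =>
        if d.contains each then d.insert each (d.getD each 0 + 1)
        else d.insert each 1)
      PySem.Dict.empty = PySem.Dict.counter l := by
  rw [PySem.Dict.counter_eq_foldl]
  apply PySem.List.foldl_congr_mem
  intro d x _
  by_cases h : d.contains x = true
  · simp [h, PySem.Dict.modify]
  · simp only [Bool.not_eq_true] at h
    simp [h, PySem.Dict.modify, PySem.Dict.getD_of_not_contains d 0 h]

-- pvFindA over (k, c k) pairs is find? on the keys.
theorem pvFindA_map (c : Int → Int) (keys : List Int) :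
    pvFindA (keys.map (fun k => (k, c k))) = keys.find? (fun k => decide (4 ≤ c k)) := by
  induction keys with
  | nil => rfl
  | cons k t ih =>
      simp only [List.map_cons, pvFindA, List.find?]
      by_cases h : 4 ≤ c k <;> simp [h, ih]

-- find? skips a prefix on which the predicate fails, through the Set.add fold.
theorem pvFind?_foldl_add (P : Int → Bool) (l : List Int) :
    ∀ s : PySem.Set Int,
      List.find? P (l.foldl PySem.Set.add s) = (List.find? P s).orElse (fun _ => List.find? P l) := by
  induction l with
  | nil => intro s; cases h : List.find? P s <;> simp [Option.orElse, h]
  | cons x t ih =>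
      intro s
      simp only [List.foldl_cons, ih (PySem.Set.add s x)]
      by_cases hc : PySem.Set.contains s x = true
      · simp only [PySem.Set.add, hc, if_pos]
        cases hs : List.find? P s with
        | some a => simp [Option.orElse]
        | none =>
            have hx : ¬ P x = true := by
              have := List.find?_eq_none.mp hs x (by
                simpa [PySem.Set.contains] using hc)
              exact this
            simp [Option.orElse, List.find?, hx]
      · simp only [PySem.Set.add, hc, if_neg, Bool.not_eq_true] at *
        rw [List.find?_append]
        cases hs : List.find? P s with
        | some a => simp [Option.orElse]
        | none =>
            simp only [Option.orElse]
            by_cases hx : P x = true <;> simp [List.find?, hx]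

theorem pvFind?_ofList (P : Int → Bool) (l : List Int) :
    List.find? P (PySem.Set.ofList l) = List.find? P l := by
  have := pvFind?_foldl_add P l []
  simpa [PySem.Set.ofList_eq_foldl, Option.orElse] using this

-- B's scan is find? with the count predicate.
theorem pvScanB_eq_find? (full l : List Int) :
    pvScanB full l = l.find? (fun x => decide (4 ≤ PySem.List.count full x)) := by
  induction l with
  | nil => rfl
  | cons x t ih =>
      simp only [pvScanB, List.find?]
      by_cases h : 4 ≤ PySem.List.count full x <;>
        · simp only [PySem.List.count] at h ⊢
          simp [h, ih]

-- ===== VERDICT (by name: the statement is the Claim_ definition above) =====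
theorem count_freq_spec : Claim_equal_count_freq := by
  intro l _
  unfold Spec_count_freq count_freq count_freq_alt
  simp only [pvFoldA_eq_counter, PySem.Dict.items_counter]
  rw [pvFindA_map (fun k => (List.count k l : Int)), pvFind?_ofList, pvScanB_eq_find?]
  have hp : (fun k => decide (4 ≤ (List.count k l : Int)))
      = (fun x => decide (4 ≤ PySem.List.count l x)) := by
    funext x
    simp only [PySem.List.count]
    apply decide_eq_decide.mpr
    exact_mod_cast Iff.rfl
  rw [hp]
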